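-- pv_equiv track=rewrite | github.com/RainbowDragon/ACSL | Python/Contest 3/2022 - 2023/CreateATreeJunior.py | list_by_value
-- ===== SOURCE A (Python) =====
-- def list_by_value(s):
--
--     letters = []
--     values = []
--
--     for k in range(len(s)):
--         if k == 0:
--             letters.append(s[k])
--             values.append(0)
--         else:
--             pos = 0
--             for letter in letters:
--                 if ord(s[k]) > ord(letter):
--                     pos += 1
--             letters.insert(pos, s[k])
--
--             index = letters.index(s[k])
--             if index == 0:
--                 values.insert(index, values[0]+1)
--             elif index == len(values):
--                 values.insert(index, values[index-1]+1)
--             else: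
--                 values.insert(index, max(values[index-1], values[index])+1)
--
--     zip_list = zip(values, letters)
--     sort_list = sorted(zip_list)
--
--     result = ""
--     for item in sort_list:
--         result += item[1]
--
--     return result
-- ===== SOURCE B (Python) =====
-- def list_by_value(s):
--     # Build the BST the problem describes (equal keys branch left), recording each
--     # character's insertion depth; then sort the (depth, char) pairs and join.
--     root = None  # node: [char, depth, left, right]
--     pairs = []
--     for c in s:
--         if root is None:
--             root = [c, 0, None, None]
--             d = 0
--         else:
--             node = root
--             while True:
--                 d = node[1] + 1
--                 if c <= node[0]:
--                     if node[2] is None: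
--                         node[2] = [c, d, None, None]
--                         break
--                     node = node[2]
--                 else:
--                     if node[3] is None:
--                         node[3] = [c, d, None, None]
--                         break
--                     node = node[3]
--         pairs.append((d, c))
--     pairs.sort()
--     return "".join(c for _, c in pairs)
-- ===== Notes on version B (the rewrite author's own statement) =====
-- stated objective: faster
-- what changed: Instead of maintaining a sorted letter list with a quadratic count-insert-index pass per character and a neighbor-depth rule, B builds the binary search tree itself (equal keys branch left), reads each character's depth directly off the insertion path, then sorts the (depth, char) pairs once.
import Mathlib
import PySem

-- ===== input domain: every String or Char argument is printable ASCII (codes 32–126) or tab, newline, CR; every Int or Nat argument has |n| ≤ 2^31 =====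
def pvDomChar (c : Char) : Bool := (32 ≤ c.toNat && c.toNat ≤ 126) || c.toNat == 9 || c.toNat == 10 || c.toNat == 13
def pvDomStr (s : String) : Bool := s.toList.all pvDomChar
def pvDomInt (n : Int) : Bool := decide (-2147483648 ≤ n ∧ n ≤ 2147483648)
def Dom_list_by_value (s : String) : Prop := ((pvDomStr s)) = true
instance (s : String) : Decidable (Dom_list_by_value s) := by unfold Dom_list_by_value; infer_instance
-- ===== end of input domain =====

-- B replaces A's quadratic sorted-list/neighbor-rule simulation by building the binary search
-- tree itself and reading each character's depth off the insertion path (objective: faster).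

-- ===== PORT A =====
-- A-side helper: the body of A's main loop for k >= 1 (the k == 0 branch stays in the fold below).
-- values[...] / letters.index(s[k]) are ported with pyGetD / getD 0: every access A performs is in
-- range and the searched character was just inserted, so Python never raises here.
def stepA (st : List Char × List Int) (c : Char) : List Char × List Int :=
  let pos : Int := st.1.foldl (fun pos letter =>
    if (c.toNat : Int) > (letter.toNat : Int) then pos + 1 else pos) 0
  let letters := PySem.List.insert st.1 pos c
  let index : Int := ((PySem.List.index? letters c).getD 0 : Nat)
  if index == 0 then
    (letters, PySem.List.insert st.2 index (PySem.List.pyGetD st.2 0 0 + 1))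
  else if index == (st.2.length : Int) then
    (letters, PySem.List.insert st.2 index (PySem.List.pyGetD st.2 (index - 1) 0 + 1))
  else
    (letters, PySem.List.insert st.2 index
      (max (PySem.List.pyGetD st.2 (index - 1) 0) (PySem.List.pyGetD st.2 index 0) + 1))

def list_by_value (s : String) : String :=
  let cs := s.toList
  let st := (PySem.List.pyRange 0 (cs.length : Int) 1).foldl
    (fun st k =>
      if k == 0 then (st.1 ++ [PySem.List.pyGetD cs k ' '], st.2 ++ [(0 : Int)])
      else stepA st (PySem.List.pyGetD cs k ' '))
    (([] : List Char), ([] : List Int))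
  let sortl := PySem.List.sorted2 (st.2.zip st.1) Prod.fst Prod.snd
  String.ofList (sortl.foldl (fun r it => r ++ [it.2]) [])

-- ===== PORT B =====
inductive BT where
  | leaf : BT
  | node : Char → Int → BT → BT → BT
deriving DecidableEq, Repr

def btIns (c : Char) : BT → BT × Int
  | .leaf => (.node c 0 .leaf .leaf, 0)
  | .node x d l r =>
    if c ≤ x then
      match l with
      | .leaf => (.node x d (.node c (d + 1) .leaf .leaf) r, d + 1)
      | .node y e u v =>
        let p := btIns c (.node y e u v)
        (.node x d p.1 r, p.2)
    else
      match r with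
      | .leaf => (.node x d l (.node c (d + 1) .leaf .leaf), d + 1)
      | .node y e u v =>
        let p := btIns c (.node y e u v)
        (.node x d l p.1, p.2)


def list_by_value_alt (s : String) : String :=
  let st := s.toList.foldl
    (fun (q : BT × List (Int × Char)) c =>
      let p := btIns c q.1
      (p.1, q.2 ++ [(p.2, c)]))
    (BT.leaf, [])
  String.ofList ((PySem.List.sorted2 st.2 Prod.fst Prod.snd).map Prod.snd)

-- ===== PRECONDITION & SPEC =====
def Spec_list_by_value (s : String) (out : String) : Prop := out = list_by_value_alt s
instance (s : String) (out : String) : Decidable (Spec_list_by_value s out) := by unfold Spec_list_by_value; infer_instance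

-- ===== CLAIM (what is proved, stated in full; the proofs are below) =====
def Claim_equal_list_by_value : Prop := ∀ (s : String), Dom_list_by_value s → Spec_list_by_value s (list_by_value s)

-- ===== LEMMAS AND PROOFS =====

def lexBefore (a b : Int × Char) : Bool :=
  decide (a.1 < b.1) || (!decide (b.1 < a.1) && decide (a.2 < b.2))

theorem lexBefore_iff (a b : Int × Char) :
    lexBefore a b = true ↔ (a.1 < b.1 ∨ (a.1 = b.1 ∧ a.2 < b.2)) := by
  unfold lexBefore
  by_cases h1 : a.1 < b.1 <;> by_cases h2 : b.1 < a.1 <;> simp [h1, h2] <;> omega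

theorem lexBefore_false_iff (a b : Int × Char) :
    lexBefore a b = false ↔ ¬ (a.1 < b.1 ∨ (a.1 = b.1 ∧ a.2 < b.2)) := by
  rw [← lexBefore_iff]; cases h : lexBefore a b <;> simp

theorem lexBefore_asymm {a b : Int × Char} (h : lexBefore a b = true) :
    lexBefore b a = false := by
  rw [lexBefore_iff] at h; rw [lexBefore_false_iff]
  rcases h with h | ⟨h1, h2⟩
  · rintro (h' | ⟨h1', _⟩) <;> omega
  · rintro (h' | ⟨h1', h2'⟩)
    · omega
    · exact absurd (lt_trans h2 h2') (lt_irrefl _)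

theorem lexBefore_trans_neg {x y z : Int × Char} (h1 : lexBefore x y = true)
    (h2 : lexBefore z y = false) : lexBefore z x = false := by
  rw [lexBefore_iff] at h1; rw [lexBefore_false_iff] at h2 ⊢
  rintro (h | ⟨ha, hb⟩) <;> rcases h1 with h1 | ⟨h1a, h1b⟩
  · exact h2 (Or.inl (by omega))
  · exact h2 (Or.inl (by omega))
  · exact h2 (Or.inl (by omega))
  · exact h2 (Or.inr ⟨by omega, lt_trans hb h1b⟩)

theorem lexBefore_antisymm {a b : Int × Char} (h1 : lexBefore a b = false)
    (h2 : lexBefore b a = false) : a = b := by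
  rw [lexBefore_false_iff] at h1 h2
  push Not at h1 h2
  have e1 : a.1 = b.1 := le_antisymm h2.1 h1.1
  have e2 : a.2 = b.2 := le_antisymm (h2.2 e1.symm) (h1.2 e1)
  exact Prod.ext e1 e2

theorem mem_insertBy' {x z : Int × Char} :
    ∀ (ys : List (Int × Char)), z ∈ PySem.List.insertBy lexBefore x ys → z = x ∨ z ∈ ys := by
  intro ys h
  rcases (PySem.List.mem_insertBy _ _ _ _).1 h with h | h
  · exact Or.inl h
  · exact Or.inr h

theorem insertBy_lex_pairwise' (x : Int × Char) :
    ∀ (ys : List (Int × Char)), ys.Pairwise (fun a b => lexBefore b a = false) →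
    (PySem.List.insertBy lexBefore x ys).Pairwise (fun a b => lexBefore b a = false) := by
  intro ys
  induction ys with
  | nil => intro _; simp [PySem.List.insertBy]
  | cons y ys ih =>
    intro h
    rw [List.pairwise_cons] at h
    by_cases hb : lexBefore x y = true
    · simp only [PySem.List.insertBy, hb, if_pos]
      rw [List.pairwise_cons]
      constructor
      · intro z hz
        rcases List.mem_cons.1 hz with rfl | hz
        · exact lexBefore_asymm hb
        · exact lexBefore_trans_neg hb (h.1 z hz)
      · rw [List.pairwise_cons]; exact h
    · have hb' : lexBefore x y = false := by cases hh : lexBefore x y <;> simp_all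
      simp only [PySem.List.insertBy, hb', Bool.false_eq_true, if_neg, not_false_iff]
      rw [List.pairwise_cons]
      constructor
      · intro z hz
        rcases mem_insertBy' _ hz with rfl | hz
        · exact hb'
        · exact h.1 z hz
      · exact ih h.2

theorem foldl_insertBy_pairwise' :
    ∀ (xs acc : List (Int × Char)), acc.Pairwise (fun a b => lexBefore b a = false) →
    (xs.foldl (fun acc x => PySem.List.insertBy lexBefore x acc) acc).Pairwise
      (fun a b => lexBefore b a = false) := by
  intro xs
  induction xs with
  | nil => intro acc h; simpa using h
  | cons x xs ih =>
    intro acc h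
    simpa using ih _ (insertBy_lex_pairwise' x acc h)

theorem sorted2_id_eq_of_perm' (l₁ l₂ : List (Int × Char)) (h : l₁.Perm l₂) :
    PySem.List.sorted2 l₁ Prod.fst Prod.snd false
      = PySem.List.sorted2 l₂ Prod.fst Prod.snd false := by
  have hp : (PySem.List.sorted2 l₁ Prod.fst Prod.snd false).Perm
      (PySem.List.sorted2 l₂ Prod.fst Prod.snd false) :=
    ((PySem.List.sorted2_perm l₁ Prod.fst Prod.snd false).trans h).trans
      (PySem.List.sorted2_perm l₂ Prod.fst Prod.snd false).symm
  have hs1 : (PySem.List.sorted2 l₁ Prod.fst Prod.snd false).Pairwise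
      (fun a b => lexBefore b a = false) := foldl_insertBy_pairwise' l₁ [] (by simp)
  have hs2 : (PySem.List.sorted2 l₂ Prod.fst Prod.snd false).Pairwise
      (fun a b => lexBefore b a = false) := foldl_insertBy_pairwise' l₂ [] (by simp)
  exact List.Perm.eq_of_pairwise
    (fun a b _ _ h1 h2 => lexBefore_antisymm h2 h1) hs1 hs2 hp

def inorder : BT → List (Int × Char)
  | .leaf => []
  | .node x d l r => inorder l ++ (d, x) :: inorder r

def WD : Int → BT → Prop
  | _, .leaf => True
  | k, .node _ d l r => d = k ∧ WD (k + 1) l ∧ WD (k + 1) r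

def BSTp : BT → Prop
  | .leaf => True
  | .node x _ l r =>
      (∀ p ∈ inorder l, p.2 ≤ x) ∧ (∀ p ∈ inorder r, x < p.2) ∧ BSTp l ∧ BSTp r

def tIns (c : Char) (k : Int) : BT → BT × Int
  | .leaf => (.node c k .leaf .leaf, k)
  | .node x d l r =>
    if c ≤ x then
      let p := tIns c (d + 1) l
      (.node x d p.1 r, p.2)
    else
      let p := tIns c (d + 1) r
      (.node x d l p.1, p.2)

def insPos (c : Char) (ps : List (Int × Char)) : Nat := ps.countP (fun q => decide (q.2 < c))

def dOfM (o : Option (Int × Char)) (m : Int) : Int := (o.map Prod.fst).getD m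

def insVal (c : Char) (ps : List (Int × Char)) (m : Int) : Int :=
  1 + max (dOfM (ps.take (insPos c ps)).getLast? m) (dOfM (ps.drop (insPos c ps)).head? m)

def listIns (c : Char) (ps : List (Int × Char)) (m : Int) : List (Int × Char) :=
  ps.take (insPos c ps) ++ (insVal c ps m, c) :: ps.drop (insPos c ps)

theorem btIns_eq_tIns (c : Char) : ∀ t : BT, btIns c t = tIns c 0 t := by
  intro t
  induction t with
  | leaf => rfl
  | node x d l r ihl ihr =>
    rw [btIns.eq_def]
    by_cases h : c ≤ x
    · cases l with
      | leaf => simp [tIns, h]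
      | node y e u v =>
        simp only [if_pos h]
        rw [show btIns c (BT.node y e u v) = tIns c 0 (BT.node y e u v) from ihl]
        simp [tIns]
        intro hh
        exact absurd h (not_le.2 hh)
    · cases r with
      | leaf => simp [tIns, h]
      | node y e u v =>
        simp only [if_neg h]
        rw [show btIns c (BT.node y e u v) = tIns c 0 (BT.node y e u v) from ihr]
        simp [tIns]
        intro hh
        exact absurd hh h

theorem wd_depths (t : BT) : ∀ k, WD k t → ∀ q ∈ inorder t, k ≤ q.1 := by
  induction t with
  | leaf => intro k _ q hq; simp [inorder] at hq
  | node x d l r ihl ihr =>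
    intro k hw q hq
    obtain ⟨hd, hwl, hwr⟩ := hw
    simp only [inorder, List.mem_append, List.mem_cons] at hq
    rcases hq with hq | hq | hq
    · have := ihl (k + 1) hwl q hq; omega
    · subst hq; simp; omega
    · have := ihr (k + 1) hwr q hq; omega

theorem tIns_mem (c : Char) :
    ∀ (t : BT) (k : Int) (q : Int × Char), q ∈ inorder (tIns c k t).1 →
      q ∈ inorder t ∨ q.2 = c := by
  intro t
  induction t with
  | leaf =>
    intro k q hq
    simp only [tIns, inorder, List.append_nil] at hq
    simp at hq
    right; rw [hq]
  | node x d l r ihl ihr =>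
    intro k q hq
    by_cases h : c ≤ x <;> simp only [tIns, if_pos, if_neg, h, if_true, if_false] at hq
    · simp only [inorder, List.mem_append, List.mem_cons] at hq ⊢
      rcases hq with hq | hq
      · rcases ihl _ _ hq with hq | hq
        · exact Or.inl (Or.inl hq)
        · exact Or.inr hq
      · exact Or.inl (Or.inr hq)
    · simp only [inorder, List.mem_append, List.mem_cons] at hq ⊢
      rcases hq with hq | hq | hq
      · exact Or.inl (Or.inl hq)
      · exact Or.inl (Or.inr (Or.inl hq))
      · rcases ihr _ _ hq with hq' | hq'
        · exact Or.inl (Or.inr (Or.inr hq'))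
        · exact Or.inr hq'

theorem tIns_WD (c : Char) : ∀ (t : BT) (k : Int), WD k t → WD k (tIns c k t).1 := by
  intro t
  induction t with
  | leaf => intro k _; exact ⟨rfl, trivial, trivial⟩
  | node x d l r ihl ihr =>
    intro k hw
    obtain ⟨hd, hwl, hwr⟩ := hw
    subst hd
    by_cases h : c ≤ x <;> simp only [tIns, h, if_true, if_false]
    · exact ⟨rfl, ihl _ hwl, hwr⟩
    · exact ⟨rfl, hwl, ihr _ hwr⟩

theorem tIns_BSTp (c : Char) : ∀ (t : BT) (k : Int), BSTp t → BSTp (tIns c k t).1 := by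
  intro t
  induction t with
  | leaf => intro k _; exact ⟨by simp [inorder], by simp [inorder], trivial, trivial⟩
  | node x d l r ihl ihr =>
    intro k hb
    obtain ⟨hL, hR, hbl, hbr⟩ := hb
    by_cases h : c ≤ x <;> simp only [tIns, h, if_true, if_false]
    · refine ⟨?_, hR, ihl _ hbl, hbr⟩
      intro p hp
      rcases tIns_mem c l _ p hp with hp' | hp'
      · exact hL p hp'
      · rw [hp']; exact h
    · refine ⟨hL, ?_, hbl, ihr _ hbr⟩
      intro p hp
      rcases tIns_mem c r _ p hp with hp' | hp'
      · exact hR p hp'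
      · rw [hp']; exact lt_of_not_ge (fun hh => h hh)

theorem tIns_ne_leaf (c : Char) (t : BT) (k : Int) : (tIns c k t).1 ≠ .leaf := by
  cases t <;> simp only [tIns] <;> try simp
  split <;> simp

theorem bst_inorder_sorted (t : BT) : BSTp t → (inorder t).Pairwise (fun a b => a.2 ≤ b.2) := by
  induction t with
  | leaf => intro _; simp [inorder]
  | node x d l r ihl ihr =>
    intro hb
    obtain ⟨hL, hR, hbl, hbr⟩ := hb
    simp only [inorder]
    rw [List.pairwise_append]
    refine ⟨ihl hbl, ?_, ?_⟩
    · rw [List.pairwise_cons]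
      refine ⟨fun b hb => le_of_lt (hR b hb), ihr hbr⟩
    · intro a ha b hb
      rcases List.mem_cons.1 hb with rfl | hb
      · exact hL a ha
      · exact le_trans (hL a ha) (le_of_lt (hR b hb))

theorem insPos_le_length (c : Char) (ps : List (Int × Char)) : insPos c ps ≤ ps.length :=
  List.countP_le_length

theorem split_left (c x : Char) (d : Int) (L R : List (Int × Char))
    (hx : ¬ x < c) (hR : ∀ p ∈ R, ¬ p.2 < c) :
    insPos c (L ++ (d, x) :: R) = insPos c L := by
  unfold insPos
  rw [List.countP_append, List.countP_cons]
  have h1 : (L ++ (d, x) :: R).countP (fun q => decide (q.2 < c)) = L.countP (fun q => decide (q.2 < c)) + ((d, x) :: R).countP (fun q => decide (q.2 < c)) := List.countP_append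
  have h2 : R.countP (fun q => decide (q.2 < c)) = 0 := by
    rw [List.countP_eq_zero]
    intro p hp; simpa using hR p hp
  simp [h2, hx]

theorem split_right (c x : Char) (d : Int) (L R : List (Int × Char))
    (hx : x < c) (hL : ∀ p ∈ L, p.2 < c) :
    insPos c (L ++ (d, x) :: R) = L.length + 1 + insPos c R := by
  unfold insPos
  rw [List.countP_append, List.countP_cons]
  have h2 : L.countP (fun q => decide (q.2 < c)) = L.length := by
    rw [List.countP_eq_length]
    intro p hp; simpa using hL p hp
  simp [h2, hx]; omega

theorem insVal_left (c x : Char) (d k : Int) (L R : List (Int × Char))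
    (hd : d = k) (hx : ¬ x < c) (hR : ∀ p ∈ R, ¬ p.2 < c)
    (hLd : ∀ q ∈ L, k + 1 ≤ q.1) :
    insVal c (L ++ (d, x) :: R) (k - 1) = insVal c L k := by
  have hpos := split_left c x d L R hx hR
  have hle := insPos_le_length c L
  unfold insVal
  rw [hpos, List.take_append_of_le_length hle, List.drop_append_of_le_length hle]
  rcases hdrop : L.drop (insPos c L) with _ | ⟨q, rest⟩
  · simp only [hdrop, List.nil_append, List.head?_cons, List.head?_nil]
    rcases htake : (L.take (insPos c L)).getLast? with _ | q'
    · simp [dOfM, hd] <;> omega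
    · have hq' : q' ∈ L := List.mem_of_mem_take (List.mem_of_getLast? htake)
      have := hLd q' hq'
      simp [dOfM, hd] <;> omega
  · simp only [hdrop, List.cons_append, List.head?_cons]
    have hq : q ∈ L := List.mem_of_mem_drop (by rw [hdrop]; exact List.mem_cons_self ..)
    have := hLd q hq
    rcases htake : (L.take (insPos c L)).getLast? with _ | q'
    · simp [dOfM] <;> omega
    · simp [dOfM]

theorem insVal_right (c x : Char) (d k : Int) (L R : List (Int × Char))
    (hd : d = k) (hx : x < c) (hL : ∀ p ∈ L, p.2 < c)
    (hRd : ∀ q ∈ R, k + 1 ≤ q.1) :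
    insVal c (L ++ (d, x) :: R) (k - 1) = insVal c R k := by
  have hpos := split_right c x d L R hx hL
  have hle := insPos_le_length c R
  unfold insVal
  rw [hpos]
  have heq : L ++ (d, x) :: R = (L ++ [(d, x)]) ++ R := by simp
  rw [heq, List.take_append, List.drop_append]
  have hlen : (L ++ [(d, x)]).length = L.length + 1 := by simp
  have h1 : (L ++ [(d, x)]).take (L.length + 1 + insPos c R) = L ++ [(d, x)] :=
    List.take_of_length_le (by omega)
  have h2 : (L ++ [(d, x)]).drop (L.length + 1 + insPos c R) = [] :=
    List.drop_eq_nil_of_le (by omega)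
  have h3 : L.length + 1 + insPos c R - (L ++ [(d, x)]).length = insPos c R := by omega
  rw [h1, h2, h3, List.nil_append]
  rcases List.eq_nil_or_concat' (R.take (insPos c R)) with htake | ⟨T0, q', htake⟩
  · rw [htake, List.append_nil, List.getLast?_concat]
    rcases hdrop : R.drop (insPos c R) with _ | ⟨q, rest⟩
    · simp [dOfM, hd] <;> omega
    · have hq : q ∈ R := List.mem_of_mem_drop (by rw [hdrop]; exact List.mem_cons_self ..)
      have := hRd q hq
      simp [dOfM, hd] <;> omega
  · have hq' : q' ∈ R := List.mem_of_mem_take (by rw [htake]; simp)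
    have hv' := hRd q' hq'
    rw [htake, List.getLast?_concat, show (L ++ [(d, x)]) ++ (T0 ++ [q']) = ((L ++ [(d, x)]) ++ T0) ++ [q'] by simp, List.getLast?_concat]
    rcases hdrop : R.drop (insPos c R) with _ | ⟨q, rest⟩
    · simp [dOfM] <;> omega
    · simp [dOfM]

theorem tIns_inorder (c : Char) :
    ∀ (t : BT) (k : Int), WD k t → BSTp t →
      inorder (tIns c k t).1 = listIns c (inorder t) (k - 1)
        ∧ (tIns c k t).2 = insVal c (inorder t) (k - 1) := by
  intro t
  induction t with
  | leaf =>
    intro k _ _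
    refine ⟨?_, ?_⟩ <;> simp [tIns, inorder, listIns, insVal, insPos, dOfM] <;> omega
  | node x d l r ihl ihr =>
    intro k hw hb
    obtain ⟨hd, hwl, hwr⟩ := hw
    obtain ⟨hL, hR, hbl, hbr⟩ := hb
    by_cases hcx : c ≤ x
    · -- descend left
      have hxc : ¬ x < c := not_lt.2 hcx
      have hRnot : ∀ p ∈ inorder r, ¬ p.2 < c := fun p hp => not_lt.2 (le_of_lt (lt_of_le_of_lt hcx (hR p hp)))
      have hLd : ∀ q ∈ inorder l, k + 1 ≤ q.1 := wd_depths l (k + 1) hwl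
      have hdk1 : d + 1 = k + 1 := by omega
      obtain ⟨ih1, ih2⟩ := ihl (d + 1) (by rw [hdk1]; exact hwl) hbl
      have hpos := split_left c x d (inorder l) (inorder r) hxc hRnot
      have hval := insVal_left c x d k (inorder l) (inorder r) hd hxc hRnot hLd
      have hle := insPos_le_length c (inorder l)
      have hva : insVal c (inorder l) (d + 1 - 1) = insVal c (inorder l) k := by
        rw [show d + 1 - 1 = k by omega]
      constructor
      · simp only [tIns, if_pos hcx, inorder]
        rw [ih1]
        unfold listIns
        rw [hpos, hval, hva, List.take_append_of_le_length hle,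
          List.drop_append_of_le_length hle]
        simp
      · simp only [tIns, if_pos hcx, inorder]
        rw [ih2, hva, hval]
    · -- descend right
      have hxc : x < c := not_le.1 hcx
      have hLlt : ∀ p ∈ inorder l, p.2 < c := fun p hp => lt_of_le_of_lt (hL p hp) hxc
      have hRd : ∀ q ∈ inorder r, k + 1 ≤ q.1 := wd_depths r (k + 1) hwr
      have hdk1 : d + 1 = k + 1 := by omega
      obtain ⟨ih1, ih2⟩ := ihr (d + 1) (by rw [hdk1]; exact hwr) hbr
      have hpos := split_right c x d (inorder l) (inorder r) hxc hLlt
      have hval := insVal_right c x d k (inorder l) (inorder r) hd hxc hLlt hRd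
      have hle := insPos_le_length c (inorder r)
      have hva : insVal c (inorder r) (d + 1 - 1) = insVal c (inorder r) k := by
        rw [show d + 1 - 1 = k by omega]
      constructor
      · simp only [tIns, if_neg hcx, inorder]
        rw [ih1]
        unfold listIns
        rw [hpos, hva, hval]
        have heq : inorder l ++ (d, x) :: inorder r = (inorder l ++ [(d, x)]) ++ inorder r := by simp
        rw [heq, List.take_append, List.drop_append]
        have h1 : (inorder l ++ [(d, x)]).take ((inorder l).length + 1 + insPos c (inorder r)) = inorder l ++ [(d, x)] :=
          List.take_of_length_le (by simp <;> omega)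
        have h2 : (inorder l ++ [(d, x)]).drop ((inorder l).length + 1 + insPos c (inorder r)) = [] :=
          List.drop_eq_nil_of_le (by simp <;> omega)
        have h3 : (inorder l).length + 1 + insPos c (inorder r) - (inorder l ++ [(d, x)]).length = insPos c (inorder r) := by simp
        rw [h1, h2, h3, List.nil_append]
        simp
      · simp only [tIns, if_neg hcx, inorder]
        rw [ih2, hva, hval]

theorem sorted_take_drop (c : Char) : ∀ (L : List Char), L.Pairwise (· ≤ ·) →
    (∀ y ∈ L.take (L.countP (fun y => decide (y < c))), y < c) ∧
    (∀ y ∈ L.drop (L.countP (fun y => decide (y < c))), ¬ y < c) := by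
  intro L
  induction L with
  | nil => exact fun _ => ⟨fun y hy => by simp at hy, fun y hy => by simp at hy⟩
  | cons y L ih =>
    intro h
    rw [List.pairwise_cons] at h
    obtain ⟨ih1, ih2⟩ := ih h.2
    by_cases hy : y < c
    · rw [List.countP_cons]
      simp only [hy, decide_true, List.take_succ_cons, List.drop_succ_cons]
      refine ⟨?_, ih2⟩
      intro z hz
      rcases List.mem_cons.1 hz with rfl | hz
      · exact hy
      · exact ih1 z hz
    · have hz0 : L.countP (fun y => decide (y < c)) = 0 := by
        rw [List.countP_eq_zero]
        intro z hz
        simp only [decide_eq_true_eq]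
        exact fun hzc => hy (lt_of_le_of_lt (h.1 z hz) hzc)
      have hcnt : (y :: L).countP (fun y => decide (y < c)) = 0 := by
        rw [List.countP_cons]; simp [hy, hz0]
      rw [hcnt]
      refine ⟨fun z hz => by simp at hz, ?_⟩
      intro z hz
      rw [List.drop_zero] at hz
      rcases List.mem_cons.1 hz with rfl | hz
      · exact hy
      · exact fun hzc => hy (lt_of_le_of_lt (h.1 z hz) hzc)

theorem stepA_zip (c : Char) (L : List Char) (V : List Int)
    (hlen : V.length = L.length) (hs : L.Pairwise (· ≤ ·)) (hnn : ∀ v ∈ V, 0 ≤ v)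
    (hne : L ≠ []) :
    (stepA (L, V) c).2.zip (stepA (L, V) c).1 = listIns c (V.zip L) (-1)
      ∧ (stepA (L, V) c).2.length = (stepA (L, V) c).1.length := by
  -- notation
  set pn := L.countP (fun y => decide (y < c)) with hpn
  have hpnle : pn ≤ L.length := List.countP_le_length
  have hZ : (V.zip L).length = L.length := by rw [List.length_zip]; omega
  -- the counting loop computes pn
  have hpos : L.foldl (fun pos letter =>
      if (c.toNat : Int) > (letter.toNat : Int) then pos + 1 else pos) 0 = (pn : Int) := by
    rw [PySem.List.foldl_ite_add_one (fun letter => (c.toNat : Int) > (letter.toNat : Int)) L 0]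
    rw [hpn]
    have : (fun x : Char => decide ((c.toNat : Int) > (x.toNat : Int)))
        = (fun y : Char => decide (y < c)) := by
      funext x
      apply decide_eq_decide.2
      rw [gt_iff_lt, Int.ofNat_lt]
      exact Iff.rfl
    rw [this]
    omega
  -- the new letters list
  have hins : PySem.List.insert L ((pn : Nat) : Int) c = L.take pn ++ c :: L.drop pn :=
    PySem.List.insert_natCast L pn c hpnle
  obtain ⟨htk, hdr⟩ := sorted_take_drop c L hs
  have hidx : PySem.List.index? (L.take pn ++ c :: L.drop pn) c = some pn := by
    rw [PySem.List.index?_eq_some_iff]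
    refine ⟨L.take pn, L.drop pn, rfl, by simp [Nat.min_eq_left hpnle], ?_⟩
    intro hc
    exact lt_irrefl c (htk c hc)
  -- insPos on the zipped list is pn
  have hinspos : insPos c (V.zip L) = pn := by
    unfold insPos
    rw [show (fun q : Int × Char => decide (q.2 < c))
        = ((fun y : Char => decide (y < c)) ∘ Prod.snd) from rfl]
    rw [← List.countP_map, List.map_snd_zip hlen.ge]
  -- unfold stepA
  have hstep : stepA (L, V) c =
      (let letters := L.take pn ++ c :: L.drop pn
       let index : Int := (pn : Nat)
       if index == 0 then
        (letters, PySem.List.insert V index (PySem.List.pyGetD V 0 0 + 1))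
       else if index == (V.length : Int) then
        (letters, PySem.List.insert V index (PySem.List.pyGetD V (index - 1) 0 + 1))
       else
        (letters, PySem.List.insert V index
          (max (PySem.List.pyGetD V (index - 1) 0) (PySem.List.pyGetD V index 0) + 1))) := by
    simp only [stepA, hpos, hins, hidx, Option.getD_some]
  rw [hstep]
  by_cases hp0 : pn = 0
  · -- insert at the front
    rcases L with _ | ⟨l0, L'⟩
    · exact absurd rfl hne
    rcases V with _ | ⟨v0, V'⟩
    · simp at hlen
    have hv0 : 0 ≤ v0 := hnn v0 (List.mem_cons_self ..)
    simp only [hp0, Nat.cast_zero, beq_self_eq_true, if_true]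
    rw [PySem.List.insert_zero, PySem.List.pyGetD_zero_cons]
    unfold listIns insVal
    rw [hinspos, hp0]
    simp only [List.take_zero, List.drop_zero, List.zip_cons_cons, List.getLast?_nil,
      List.head?_cons, List.nil_append]
    constructor
    · simp [dOfM]; omega
    · simp [hlen]
  · have hpn1 : 1 ≤ pn := Nat.one_le_iff_ne_zero.2 hp0
    have hZpn : ∀ i : Nat, ∀ hi : i < L.length, (V.zip L)[i]? = some (V[i]'(by omega), L[i]'hi) := by
      intro i hi
      have hi2 : i < (V.zip L).length := by rw [hZ]; exact hi
      rw [List.getElem?_eq_getElem hi2, List.getElem_zip]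
    have hcond0 : (((pn : Nat) : Int) == 0) = false := by simp; omega
    by_cases hpl : pn = V.length
    · -- insert at the end
      have hplL : pn = L.length := by omega
      have hcondl : (((pn : Nat) : Int) == ((V.length : Nat) : Int)) = true := by simp; omega
      simp only [hcond0, hcondl, Bool.false_eq_true, if_false, if_true]
      have htkL : L.take pn = L := List.take_of_length_le (by omega)
      have hdrL : L.drop pn = [] := List.drop_eq_nil_of_le (by omega)
      have hc1 : ((pn : Nat) : Int) - 1 = ((pn - 1 : Nat) : Int) := by omega
      have hlt : pn - 1 < V.length := by omega
      have hgd : V.getD (pn - 1) 0 = V[pn - 1] := by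
        rw [List.getD_eq_getElem?_getD, List.getElem?_eq_getElem hlt]; rfl
      have hvnn : 0 ≤ V[pn - 1] := hnn _ (List.getElem_mem hlt)
      rw [htkL, hdrL, hc1, PySem.List.pyGetD_natCast, hgd,
        PySem.List.insert_natCast V pn _ (by omega),
        List.take_of_length_le (le_of_eq hpl.symm), List.drop_eq_nil_of_le (le_of_eq hpl.symm)]
      have hZlen : (V.zip L).length = pn := by omega
      unfold listIns insVal
      rw [hinspos,
        List.take_of_length_le (le_of_eq hZlen), List.drop_eq_nil_of_le (le_of_eq hZlen)]
      have hgl : dOfM (V.zip L).getLast? (-1) = V[pn - 1] := by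
        rw [List.getLast?_eq_getElem?, hZlen, hZpn (pn - 1) (by omega)]
        rfl
      constructor
      · rw [List.zip_append hlen, hgl]
        simp [dOfM]
        omega
      · simp [hlen]
    · -- insert in the middle
      have hplt : pn < V.length := by omega
      have hcondl : (((pn : Nat) : Int) == ((V.length : Nat) : Int)) = false := by simp; omega
      simp only [hcond0, hcondl, Bool.false_eq_true, if_false]
      have hc1 : ((pn : Nat) : Int) - 1 = ((pn - 1 : Nat) : Int) := by omega
      have hlt1 : pn - 1 < V.length := by omega
      have hgd1 : V.getD (pn - 1) 0 = V[pn - 1] := by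
        rw [List.getD_eq_getElem?_getD, List.getElem?_eq_getElem hlt1]; rfl
      have hgd2 : V.getD pn 0 = V[pn] := by
        rw [List.getD_eq_getElem?_getD, List.getElem?_eq_getElem hplt]; rfl
      rw [hc1, PySem.List.pyGetD_natCast, PySem.List.pyGetD_natCast, hgd1, hgd2,
        PySem.List.insert_natCast V pn _ (by omega)]
      have htkz : (V.zip L).take pn = (V.take pn).zip (L.take pn) := by
        simp [List.zip_eq_zipWith, List.take_zipWith]
      have hdrz : (V.zip L).drop pn = (V.drop pn).zip (L.drop pn) := by
        simp [List.zip_eq_zipWith, List.drop_zipWith]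
      have htklen : (V.take pn).length = (L.take pn).length := by
        simp [Nat.min_eq_left hpnle, Nat.min_eq_left (le_of_lt hplt)]
      unfold listIns insVal
      rw [hinspos]
      have hpred : dOfM ((V.zip L).take pn).getLast? (-1) = V[pn - 1] := by
        rw [List.getLast?_take]
        simp only [hp0, if_false]
        rw [hZpn (pn - 1) (by omega), Option.some_or]
        rfl
      have hsucc : dOfM ((V.zip L).drop pn).head? (-1) = V[pn] := by
        rw [List.head?_drop, hZpn pn (by omega)]
        rfl
      constructor
      · rw [List.zip_append htklen, hpred, hsucc, htkz, hdrz]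
        simp
        omega
      · simp [hlen]

theorem inorder_ne_nil (t : BT) (h : t ≠ .leaf) : inorder t ≠ [] := by
  cases t with
  | leaf => exact absurd rfl h
  | node x d l r => simp [inorder]

theorem listIns_perm (c : Char) (ps : List (Int × Char)) (m : Int) :
    (listIns c ps m).Perm ((insVal c ps m, c) :: ps) := by
  unfold listIns
  refine List.perm_middle.trans ?_
  rw [List.take_append_drop]

theorem loop_inv (cs : List Char) :
    ∀ (L : List Char) (V : List Int) (t : BT) (bp : List (Int × Char)),
      V.zip L = inorder t → V.length = L.length → WD 0 t → BSTp t → t ≠ .leaf →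
      (inorder t).Perm bp →
      ((cs.foldl stepA (L, V)).2.zip (cs.foldl stepA (L, V)).1
          = inorder (cs.foldl (fun (q : BT × List (Int × Char)) c =>
              ((tIns c 0 q.1).1, q.2 ++ [((tIns c 0 q.1).2, c)])) (t, bp)).1
        ∧ (cs.foldl stepA (L, V)).2.length = (cs.foldl stepA (L, V)).1.length
        ∧ WD 0 (cs.foldl (fun (q : BT × List (Int × Char)) c =>
              ((tIns c 0 q.1).1, q.2 ++ [((tIns c 0 q.1).2, c)])) (t, bp)).1
        ∧ BSTp (cs.foldl (fun (q : BT × List (Int × Char)) c =>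
              ((tIns c 0 q.1).1, q.2 ++ [((tIns c 0 q.1).2, c)])) (t, bp)).1
        ∧ (cs.foldl (fun (q : BT × List (Int × Char)) c =>
              ((tIns c 0 q.1).1, q.2 ++ [((tIns c 0 q.1).2, c)])) (t, bp)).1 ≠ .leaf
        ∧ (inorder (cs.foldl (fun (q : BT × List (Int × Char)) c =>
              ((tIns c 0 q.1).1, q.2 ++ [((tIns c 0 q.1).2, c)])) (t, bp)).1).Perm
            (cs.foldl (fun (q : BT × List (Int × Char)) c =>
              ((tIns c 0 q.1).1, q.2 ++ [((tIns c 0 q.1).2, c)])) (t, bp)).2) := by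
  induction cs with
  | nil =>
    intro L V t bp hzip hlen hwd hbst hne hperm
    exact ⟨hzip, hlen, hwd, hbst, hne, hperm⟩
  | cons c cs ih =>
    intro L V t bp hzip hlen hwd hbst hne hperm
    -- facts about the current state
    have hLs : L.Pairwise (· ≤ ·) := by
      have h1 : (V.zip L).map Prod.snd = L := List.map_snd_zip hlen.ge
      have h2 : (inorder t).Pairwise (fun a b => a.2 ≤ b.2) := bst_inorder_sorted t hbst
      rw [← h1, hzip]
      exact (List.pairwise_map).2 h2
    have hnn : ∀ v ∈ V, 0 ≤ v := by
      intro v hv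
      have h1 : (V.zip L).map Prod.fst = V := List.map_fst_zip hlen.le
      rw [← h1, hzip] at hv
      rcases List.mem_map.1 hv with ⟨q, hq, rfl⟩
      exact wd_depths t 0 hwd q hq
    have hLne : L ≠ [] := by
      intro h0
      have : V.zip L = [] := by rw [h0]; simp
      rw [hzip] at this
      exact inorder_ne_nil t hne this
    obtain ⟨hstep1, hstep2⟩ := stepA_zip c L V hlen hLs hnn hLne
    obtain ⟨hins1, hins2⟩ := tIns_inorder c t 0 hwd hbst
    have hm : (0 : Int) - 1 = -1 := by omega
    rw [hm] at hins1 hins2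
    -- new state correspondence
    have hzip' : (stepA (L, V) c).2.zip (stepA (L, V) c).1 = inorder (tIns c 0 t).1 := by
      rw [hstep1, hzip, hins1]
    have hperm' : (inorder (tIns c 0 t).1).Perm (bp ++ [((tIns c 0 t).2, c)]) := by
      rw [hins1, hins2]
      refine (listIns_perm c (inorder t) (-1)).trans ?_
      exact (List.Perm.cons _ hperm).trans (List.perm_append_singleton _ _).symm
    simp only [List.foldl_cons]
    exact ih (stepA (L, V) c).1 (stepA (L, V) c).2 (tIns c 0 t).1 (bp ++ [((tIns c 0 t).2, c)])
      hzip' hstep2 (tIns_WD c t 0 hwd) (tIns_BSTp c t 0 hbst) (tIns_ne_leaf c t 0) hperm'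

theorem list_by_value_spec' (s : String) : list_by_value s = list_by_value_alt s := by
  simp only [list_by_value, list_by_value_alt]
  have hbody : (fun (q : BT × List (Int × Char)) c =>
      let p := btIns c q.1; (p.1, q.2 ++ [(p.2, c)]))
      = (fun (q : BT × List (Int × Char)) c =>
      ((tIns c 0 q.1).1, q.2 ++ [((tIns c 0 q.1).2, c)])) := by
    funext q c
    simp only [btIns_eq_tIns]
  rw [hbody]
  rcases hcs : s.toList with _ | ⟨c0, rest⟩
  · rfl
  · have hlen0 : (0 : Int) < (((c0 :: rest) : List Char).length : Int) := by simp
    rw [PySem.List.pyRange_one_cons hlen0]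
    simp only [List.foldl_cons]
    have hA0 : (if (0 : Int) == 0 then
        (([] : List Char) ++ [PySem.List.pyGetD (c0 :: rest) (0 : Int) ' '],
         ([] : List Int) ++ [(0 : Int)])
        else stepA ([], []) (PySem.List.pyGetD (c0 :: rest) (0 : Int) ' ')) = ([c0], [0]) := by
      simp [PySem.List.pyGetD_zero_cons]
    rw [hA0]
    rw [show (0 : Int) + 1 = 1 by omega]
    have hcongr : (PySem.List.pyRange 1 (((c0 :: rest) : List Char).length : Int) 1).foldl
        (fun st k =>
          if k == 0 then (st.1 ++ [PySem.List.pyGetD (c0 :: rest) k ' '], st.2 ++ [(0 : Int)])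
          else stepA st (PySem.List.pyGetD (c0 :: rest) k ' ')) ([c0], [0])
        = (PySem.List.pyRange 1 (((c0 :: rest) : List Char).length : Int) 1).foldl
        (fun st k => stepA st (PySem.List.pyGetD (c0 :: rest) k ' ')) ([c0], [0]) := by
      refine PySem.List.foldl_congr_mem _ _ _ _ ?_
      intro acc x hx
      rw [PySem.List.mem_pyRange_one] at hx
      have : (x == 0) = false := by simp; omega
      rw [this]
      simp
    rw [hcongr]
    rw [PySem.List.foldl_pyRange_pyGetD' (c0 :: rest) ' ' stepA ([c0], [0]) (by omega : (0:Int) ≤ 1)]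
    have hdrop : ((c0 :: rest) : List Char).drop ((1 : Int)).toNat = rest := by simp
    rw [hdrop]
    -- B first step
    simp only [show tIns c0 0 BT.leaf = (BT.node c0 0 BT.leaf BT.leaf, (0 : Int)) from rfl,
      List.nil_append]
    have key := loop_inv rest [c0] [0] (BT.node c0 0 .leaf .leaf) [(0, c0)]
      rfl rfl ⟨rfl, trivial, trivial⟩
      ⟨by simp [inorder], by simp [inorder], trivial, trivial⟩
      (by simp) (List.Perm.refl _)
    obtain ⟨k1, _, _, _, _, k6⟩ := key
    rw [k1] at *
    have hsort := sorted2_id_eq_of_perm' _ _ k6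
    rw [hsort]
    rw [PySem.List.foldl_append_singleton_eq_map (f := fun it : Int × Char => it.2)]
    simp

-- ===== VERDICT (by name: the statement is the Claim_ definition above) =====
theorem list_by_value_spec : Claim_equal_list_by_value := by
  intro s _
  exact list_by_value_spec' s
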